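-- pv_equiv track=rewrite | github.com/huggingface/transformers | gQA/Preprocessing/preprocessing.py | lasttofirst_str
-- ===== SOURCE A (Python) =====
-- flatten = lambda l: [item for sublist in l for item in sublist]
--
-- def aggressive_fix_punc(string):
--     string = string.replace('\n','')
--     string = string.replace('.', '')
--     string = string.replace('!', '')
--     string = string.replace('?', '')
--     string = string.replace(',', '')
--     return(string)
--
-- def lasttofirst_str(nparr):
--     paragraphs = []
--     string = ''
--     for i in range(len(nparr)):
--         string = string + nparr[i]
--         if not nparr[i].startswith(' '):
--             strs = aggressive_fix_punc(string).split()
--             for j in range(len(strs)):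
--                 strs[j] = strs[j].split('\'')
--             strs = flatten(strs)
--             paragraphs.append(strs)
--             string = ''
--     return paragraphs
-- ===== SOURCE B (Python) =====
-- def _tokens(seg):
--     # one-pass character automaton: delete '\n.!?,', flush the open token at
--     # whitespace, close a piece at each apostrophe, extend the piece otherwise
--     tokens = []
--     cur = None  # open token = list of pieces, last one still being built
--     for ch in seg:
--         if ch in '\n.!?,':
--             continue
--         if ch.isspace():
--             if cur is not None:
--                 tokens.extend(cur)
--                 cur = None
--         elif ch == "'":
--             if cur is None:
--                 cur = ['']
--             cur.append('')
--         else: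
--             if cur is None:
--                 cur = ['']
--             cur[-1] += ch
--     if cur is not None:
--         tokens.extend(cur)
--     return tokens
--
-- def lasttofirst_str(nparr):
--     # segment boundaries = indices whose element does not start with ' ';
--     # each segment is a slice of nparr between consecutive boundaries
--     cuts = [i for i, s in enumerate(nparr) if not s.startswith(' ')]
--     out = []
--     prev = 0
--     for c in cuts:
--         out.append(_tokens(''.join(nparr[prev:c + 1])))
--         prev = c + 1
--     return out
-- ===== Notes on version B (the rewrite author's own statement) =====
-- stated objective: alternative
-- what changed: Segmentation is done by precomputing the list of boundary indices (elements not starting with ' ') and slicing nparr between consecutive boundaries instead of A's running string accumulator, and the per-segment cleaning replaces A's five replace passes + split() + per-token split("'") + flatten pipeline by a single one-pass character automaton that deletes punctuation, flushes tokens at whitespace and closes pieces at apostrophes.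
import Mathlib
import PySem

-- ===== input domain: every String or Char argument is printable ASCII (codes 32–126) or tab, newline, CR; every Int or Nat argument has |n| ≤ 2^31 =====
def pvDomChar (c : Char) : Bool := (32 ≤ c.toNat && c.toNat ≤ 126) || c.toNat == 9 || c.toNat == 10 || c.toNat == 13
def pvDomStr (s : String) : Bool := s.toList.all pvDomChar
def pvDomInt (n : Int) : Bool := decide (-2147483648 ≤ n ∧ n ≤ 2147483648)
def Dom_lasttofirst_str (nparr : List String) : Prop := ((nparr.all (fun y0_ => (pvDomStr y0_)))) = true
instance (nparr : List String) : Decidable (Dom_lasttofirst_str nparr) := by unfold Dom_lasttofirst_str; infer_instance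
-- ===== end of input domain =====

-- B replaces A's running-accumulator chunking by boundary-index slicing and A's
-- replace/split/split'/flatten cleaning pipeline by a one-pass character automaton; same return value.

-- ===== PORT A =====
def aggressive_fix_punc (s : String) : String :=
  PySem.Str.replace (PySem.Str.replace (PySem.Str.replace (PySem.Str.replace (PySem.Str.replace s "\n" "") "." "") "!" "") "?" "") "," ""

-- A: one loop; accumulate into a string, flush a cleaned token list when the element does not start with ' '
def lasttofirst_str (nparr : List String) : List (List String) :=
  (nparr.foldl
    (fun (st : List (List String) × String) x =>
      let s := st.2 ++ x
      if !(PySem.Str.startswith x " ") then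
        (st.1 ++ [((PySem.Str.split₀ (aggressive_fix_punc s)).map (fun t => (PySem.Chars.splitOn t.toList "'".toList).map String.ofList)).flatten], "")
      else
        (st.1, s))
    ([], "")).1

-- ===== PORT B =====
-- the character automaton of _tokens in Source B: cur = none (no open token) or
-- some (finished pieces, piece being built); 'ch in "\n.!?,"' ported as list membership
def pvTokGo : List Char → List (List Char) → Option (List (List Char) × List Char) → List (List Char)
  | [], toks, none => toks
  | [], toks, some (ps, p) => toks ++ ps ++ [p]
  | c :: cs, toks, cur =>
    if c ∈ (['\n', '.', '!', '?', ','] : List Char) then pvTokGo cs toks cur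
    else if PySem.Chars.isspace c then
      match cur with
      | none => pvTokGo cs toks none
      | some (ps, p) => pvTokGo cs (toks ++ ps ++ [p]) none
    else if c = '\'' then
      match cur with
      | none => pvTokGo cs toks (some ([[]], []))
      | some (ps, p) => pvTokGo cs toks (some (ps ++ [p], []))
    else
      match cur with
      | none => pvTokGo cs toks (some ([], [c]))
      | some (ps, p) => pvTokGo cs toks (some (ps, p ++ [c]))

def pvTokens (seg : String) : List String :=
  (pvTokGo seg.toList [] none).map String.ofList

-- B: boundary indices via enumerate, then one fold slicing nparr between consecutive boundaries
def lasttofirst_str_alt (nparr : List String) : List (List String) :=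
  (((PySem.List.enumerate nparr 0).filterMap
      (fun q => if !(PySem.Str.startswith q.2 " ") then some q.1 else none)).foldl
    (fun (st : List (List String) × Int) c =>
      (st.1 ++ [pvTokens (PySem.Str.join "" (PySem.List.slice nparr (some st.2) (some (c + 1))))], c + 1))
    ([], 0)).1

-- ===== PRECONDITION & SPEC =====
def Spec_lasttofirst_str (nparr : List String) (out : List (List String)) : Prop := out = lasttofirst_str_alt nparr
instance (nparr : List String) (out : List (List String)) : Decidable (Spec_lasttofirst_str nparr out) := by unfold Spec_lasttofirst_str; infer_instance

-- ===== CLAIM (what is proved, stated in full; the proofs are below) =====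
def Claim_equal_lasttofirst_str : Prop := ∀ (nparr : List String), Dom_lasttofirst_str nparr → Spec_lasttofirst_str nparr (lasttofirst_str nparr)

-- ===== LEMMAS AND PROOFS =====

-- chars kept by aggressive_fix_punc
def pvKeep (c : Char) : Bool := !(decide (c ∈ (['\n', '.', '!', '?', ','] : List Char)))

-- prepend p to the first piece
def pvMF (p : List Char) : List (List Char) → List (List Char)
  | [] => [p]
  | q :: qs => (p ++ q) :: qs

-- spec of splitOn "'"
def pvSplitQ : List Char → List (List Char)
  | [] => [[]]
  | c :: cs => if c = '\'' then [] :: pvSplitQ cs else pvMF [c] (pvSplitQ cs)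

-- spec of split()
def pvWords : List Char → List (List Char)
  | [] => []
  | c :: cs =>
    if PySem.Chars.isspace c then pvWords cs
    else (c :: cs.takeWhile (fun d => !PySem.Chars.isspace d)) :: pvWords (cs.dropWhile (fun d => !PySem.Chars.isspace d))
termination_by cs => cs.length
decreasing_by
  · simp
  · have := List.length_dropWhile_le (fun d => !PySem.Chars.isspace d) cs
    simp
    omega

-- cleaned token pieces of a (punctuation-free) char list
def pvF (cs : List Char) : List (List Char) := ((pvWords cs).map pvSplitQ).flatten

theorem pvMF_nil (l : List (List Char)) (h : l ≠ []) : pvMF [] l = l := by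
  cases l with
  | nil => exact absurd rfl h
  | cons q qs => simp [pvMF]

theorem pvSplitQ_ne_nil (cs : List Char) : pvSplitQ cs ≠ [] := by
  cases cs with
  | nil => simp [pvSplitQ]
  | cons c cs =>
    simp only [pvSplitQ]
    split
    · simp
    · cases h : pvSplitQ cs <;> simp [pvMF]

theorem pvMF_pvMF (p c : List Char) (l : List (List Char)) :
    pvMF p (pvMF c l) = pvMF (p ++ c) l := by
  cases l <;> simp [pvMF]

-- replace by a single character with empty replacement is filter
theorem pvReplaceGo (c : Char) : ∀ (fuel : Nat) (l acc : List Char), l.length ≤ fuel →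
    PySem.Chars.replace.go [c] [] fuel l acc = acc.reverse ++ l.filter (fun d => !(d == c)) := by
  intro fuel
  induction fuel with
  | zero =>
    intro l acc h
    have hl : l = [] := by cases l <;> simp_all
    subst hl
    simp [PySem.Chars.replace.go]
  | succ f ih =>
    intro l acc h
    cases l with
    | nil => simp [PySem.Chars.replace.go]
    | cons d t =>
      have hlen : t.length ≤ f := by simpa using h
      by_cases hd : d = c
      · subst hd
        have hpre : ([d].isPrefixOf (d :: t)) = true := by simp [List.isPrefixOf]
        simp only [PySem.Chars.replace.go, hpre, if_true]
        rw [show List.drop [d].length (d :: t) = t by simp]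
        rw [ih t _ hlen]
        simp
      · have hpre : ([c].isPrefixOf (d :: t)) = false := by simp [List.isPrefixOf]; exact fun h => absurd h.symm hd
        simp only [PySem.Chars.replace.go, hpre, Bool.false_eq_true, if_false]
        rw [ih t (d :: acc) hlen]
        simp [List.filter_cons]
        intro hdc
        exact absurd hdc hd

theorem pvReplaceChar (c : Char) (s : List Char) :
    PySem.Chars.replace s [c] [] = s.filter (fun d => !(d == c)) := by
  unfold PySem.Chars.replace
  rw [if_neg (by simp)]
  rw [pvReplaceGo c s.length s [] (le_refl _)]
  simp

-- split₀.go accumulator laws and split₀ = pvWords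
theorem pvSplit0GoAcc : ∀ (l cur : List Char) (acc : List (List Char)),
    PySem.Chars.split₀.go l cur acc = acc.reverse ++ PySem.Chars.split₀.go l cur [] := by
  intro l
  induction l with
  | nil =>
    intro cur acc
    by_cases hc : cur = []
    · subst hc; simp [PySem.Chars.split₀.go]
    · simp [PySem.Chars.split₀.go, hc]
  | cons c rest ih =>
    intro cur acc
    by_cases hw : PySem.Chars.isspace c = true
    · cases cur with
      | nil =>
        simp only [PySem.Chars.split₀.go, hw, if_true, List.isEmpty_nil]
        exact ih [] acc
      | cons u us =>
        simp only [PySem.Chars.split₀.go, hw, if_true, List.isEmpty_cons, Bool.false_eq_true, if_false]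
        rw [ih [] ((u :: us).reverse :: acc), ih [] [(u :: us).reverse]]
        simp
    · simp only [PySem.Chars.split₀.go, hw, Bool.false_eq_true, if_false]
      exact ih (c :: cur) acc

theorem pvSplit0GoOpen : ∀ (cs cur : List Char), cur ≠ [] →
    PySem.Chars.split₀.go cs cur [] =
      (cur.reverse ++ cs.takeWhile (fun d => !PySem.Chars.isspace d)) ::
        PySem.Chars.split₀ (cs.dropWhile (fun d => !PySem.Chars.isspace d)) := by
  intro cs
  induction cs with
  | nil =>
    intro cur hc
    simp [PySem.Chars.split₀.go, PySem.Chars.split₀, hc]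
  | cons c rest ih =>
    intro cur hc
    obtain ⟨u, us, rfl⟩ := List.exists_cons_of_ne_nil hc
    by_cases hw : PySem.Chars.isspace c = true
    · simp only [PySem.Chars.split₀.go, hw, if_true, List.isEmpty_cons, Bool.false_eq_true, if_false]
      rw [pvSplit0GoAcc rest [] [(u :: us).reverse]]
      rw [List.dropWhile_cons_of_neg (by simp [hw]), List.takeWhile_cons_of_neg (by simp [hw])]
      have hsp : PySem.Chars.split₀ (c :: rest) = PySem.Chars.split₀ rest := by
        simp [PySem.Chars.split₀, PySem.Chars.split₀.go, hw]
      rw [hsp]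
      simp [PySem.Chars.split₀]
    · simp only [PySem.Chars.split₀.go, hw, Bool.false_eq_true, if_false]
      rw [ih (c :: u :: us) (by simp)]
      rw [List.takeWhile_cons_of_pos (by simp [hw]), List.dropWhile_cons_of_pos (by simp [hw])]
      simp

theorem pvSplit0_eq_pvWords (cs : List Char) : PySem.Chars.split₀ cs = pvWords cs := by
  induction cs using pvWords.induct with
  | case1 => simp [PySem.Chars.split₀, PySem.Chars.split₀.go, pvWords]
  | case2 c cs hws ih =>
    have : PySem.Chars.split₀ (c :: cs) = PySem.Chars.split₀ cs := by
      simp [PySem.Chars.split₀, PySem.Chars.split₀.go, hws]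
    rw [this, ih, pvWords]
    simp [hws]
  | case3 c cs hws ih =>
    have h1 : PySem.Chars.split₀ (c :: cs) = PySem.Chars.split₀.go cs [c] [] := by
      simp [PySem.Chars.split₀, PySem.Chars.split₀.go, hws]
    rw [h1, pvSplit0GoOpen cs [c] (by simp), ih]
    simp [pvWords, hws]

-- splitOn "'" = pvSplitQ
theorem pvSplitOnGo : ∀ (l : List Char) (fuel : Nat) (cur : List Char) (acc : List (List Char)),
    l.length < fuel →
    PySem.Chars.splitOn.go ['\''] fuel l cur acc = acc.reverse ++ pvMF cur.reverse (pvSplitQ l) := by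
  intro l
  induction l with
  | nil =>
    intro fuel cur acc h
    cases fuel with
    | zero => omega
    | succ f => simp [PySem.Chars.splitOn.go, pvSplitQ, pvMF]
  | cons c rest ih =>
    intro fuel cur acc h
    cases fuel with
    | zero => omega
    | succ f =>
      have hlen : rest.length < f := by simpa using h
      by_cases hc : c = '\''
      · subst hc
        have hpre : (['\''].isPrefixOf ('\'' :: rest)) = true := by simp [List.isPrefixOf]
        simp only [PySem.Chars.splitOn.go, hpre, if_true]
        rw [show List.drop ['\''].length ('\'' :: rest) = rest by simp]
        rw [ih f [] (cur.reverse :: acc) hlen]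
        simp only [List.reverse_nil]
        rw [pvMF_nil _ (pvSplitQ_ne_nil rest)]
        simp [pvSplitQ, pvMF]
      · have hpre : (['\''].isPrefixOf (c :: rest)) = false := by
          simp [List.isPrefixOf]; exact fun h => absurd h.symm hc
        simp only [PySem.Chars.splitOn.go, hpre, Bool.false_eq_true, if_false]
        rw [ih f (c :: cur) acc hlen]
        simp only [List.reverse_cons, pvSplitQ, hc, if_false, pvMF_pvMF]

theorem pvSplitOn_eq_pvSplitQ (l : List Char) :
    PySem.Chars.splitOn l ['\''] = pvSplitQ l := by
  unfold PySem.Chars.splitOn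
  rw [pvSplitOnGo l (l.length + 1) [] [] (by omega)]
  simp [pvMF_nil _ (pvSplitQ_ne_nil l)]

-- pvF at a cons
theorem pvF_cons_ws {c : Char} (cs : List Char) (hw : PySem.Chars.isspace c = true) :
    pvF (c :: cs) = pvF cs := by
  simp [pvF, pvWords, hw]

theorem pvF_cons_not {c : Char} (cs : List Char) (hw : PySem.Chars.isspace c = false) :
    pvF (c :: cs) = pvSplitQ (c :: cs.takeWhile (fun d => !PySem.Chars.isspace d)) ++
      pvF (cs.dropWhile (fun d => !PySem.Chars.isspace d)) := by
  simp [pvF, pvWords, hw]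

-- the automaton skips exactly the deleted characters
theorem pvTokGo_filter : ∀ (cs : List Char) (toks : List (List Char)) (cur : Option (List (List Char) × List Char)),
    pvTokGo cs toks cur = pvTokGo (cs.filter pvKeep) toks cur := by
  intro cs
  induction cs with
  | nil => intro toks cur; rfl
  | cons c cs ih =>
    intro toks cur
    by_cases hm : c ∈ (['\n', '.', '!', '?', ','] : List Char)
    · have hk : pvKeep c = false := by simp [pvKeep, hm]
      rw [List.filter_cons_of_neg (by simp [hk])]
      simp only [pvTokGo, if_pos hm]
      exact ih toks cur
    · have hk : pvKeep c = true := by simp [pvKeep, hm]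
      rw [List.filter_cons_of_pos (by simp [hk])]
      by_cases hw : PySem.Chars.isspace c = true
      · cases cur with
        | none => simp only [pvTokGo, if_neg hm, hw, if_true]; exact ih toks none
        | some pr =>
          obtain ⟨ps, p⟩ := pr
          simp only [pvTokGo, if_neg hm, hw, if_true]
          exact ih _ none
      · by_cases hq : c = '\''
        · cases cur with
          | none => simp only [pvTokGo, if_neg hm, hw, Bool.false_eq_true, if_false, hq, if_true]; exact ih toks _
          | some pr =>
            obtain ⟨ps, p⟩ := pr
            simp only [pvTokGo, if_neg hm, hw, Bool.false_eq_true, if_false, hq, if_true]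
            exact ih toks _
        · cases cur with
          | none => simp only [pvTokGo, if_neg hm, hw, Bool.false_eq_true, if_false, if_neg hq]; exact ih toks _
          | some pr =>
            obtain ⟨ps, p⟩ := pr
            simp only [pvTokGo, if_neg hm, hw, Bool.false_eq_true, if_false, if_neg hq]
            exact ih toks _

-- the automaton computes pvF on punctuation-free input
theorem pvTokGo_main : ∀ (cs : List Char),
    (∀ (toks : List (List Char)), (∀ c ∈ cs, pvKeep c = true) → pvTokGo cs toks none = toks ++ pvF cs) ∧
    (∀ (toks ps : List (List Char)) (p : List Char), (∀ c ∈ cs, pvKeep c = true) →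
      pvTokGo cs toks (some (ps, p)) =
        toks ++ ps ++ pvMF p (pvSplitQ (cs.takeWhile (fun d => !PySem.Chars.isspace d))) ++
          pvF (cs.dropWhile (fun d => !PySem.Chars.isspace d))) := by
  intro cs
  induction cs with
  | nil =>
    constructor
    · intro toks _; simp [pvTokGo, pvF, pvWords]
    · intro toks ps p _; simp [pvTokGo, pvSplitQ, pvMF, pvF, pvWords]
  | cons c cs ih =>
    obtain ⟨ihC, ihO⟩ := ih
    have key : (∀ d ∈ c :: cs, pvKeep d = true) → c ∉ (['\n', '.', '!', '?', ','] : List Char) := by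
      intro h hmem
      have hk := h c (by simp)
      simp [pvKeep, hmem] at hk
    constructor
    · intro toks h
      have hm := key h
      have hcs : ∀ d ∈ cs, pvKeep d = true := fun d hd => h d (by simp [hd])
      by_cases hw : PySem.Chars.isspace c = true
      · simp only [pvTokGo, if_neg hm, hw, if_true]
        rw [ihC toks hcs, pvF_cons_ws cs hw]
      · by_cases hq : c = '\''
        · subst hq
          simp only [pvTokGo]
          rw [if_neg (by decide), if_neg (by decide), if_pos trivial]
          rw [ihO toks [[]] [] hcs]
          rw [pvMF_nil _ (pvSplitQ_ne_nil _)]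
          rw [pvF_cons_not cs (by simpa using hw)]
          simp [pvSplitQ]
        · simp only [pvTokGo, if_neg hm, hw, Bool.false_eq_true, if_false, if_neg hq]
          rw [ihO toks [] [c] hcs]
          rw [pvF_cons_not cs (by simpa using hw)]
          simp [pvSplitQ, hq]
    · intro toks ps p h
      have hm := key h
      have hcs : ∀ d ∈ cs, pvKeep d = true := fun d hd => h d (by simp [hd])
      by_cases hw : PySem.Chars.isspace c = true
      · simp only [pvTokGo, if_neg hm, hw, if_true]
        rw [ihC _ hcs]
        rw [List.takeWhile_cons_of_neg (by simp [hw]), List.dropWhile_cons_of_neg (by simp [hw]),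
          pvF_cons_ws cs hw]
        simp [pvSplitQ, pvMF]
      · by_cases hq : c = '\''
        · subst hq
          simp only [pvTokGo]
          rw [if_neg (by decide), if_neg (by decide), if_pos trivial]
          rw [ihO toks (ps ++ [p]) [] hcs]
          rw [pvMF_nil _ (pvSplitQ_ne_nil _)]
          rw [List.takeWhile_cons_of_pos (by decide), List.dropWhile_cons_of_pos (by decide)]
          simp [pvSplitQ, pvMF]
        · simp only [pvTokGo, if_neg hm, hw, Bool.false_eq_true, if_false, if_neg hq]
          rw [ihO toks ps (p ++ [c]) hcs]
          rw [List.takeWhile_cons_of_pos (by simp [hw]), List.dropWhile_cons_of_pos (by simp [hw])]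
          simp [pvSplitQ, hq, pvMF_pvMF]

-- B's cleaning equals A's cleaning pipeline on every string
theorem pv_fixpunc_toList (s : String) :
    (aggressive_fix_punc s).toList = s.toList.filter pvKeep := by
  unfold aggressive_fix_punc
  simp only [PySem.Str.toList_replace]
  rw [show ("\n" : String).toList = ['\n'] from rfl, show ("." : String).toList = ['.'] from rfl,
    show ("!" : String).toList = ['!'] from rfl, show ("?" : String).toList = ['?'] from rfl,
    show ("," : String).toList = [','] from rfl, show ("" : String).toList = [] from rfl]
  rw [pvReplaceChar, pvReplaceChar, pvReplaceChar, pvReplaceChar, pvReplaceChar]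
  simp only [List.filter_filter]
  apply List.filter_congr
  intro x _
  rw [Bool.eq_iff_iff]
  simp [pvKeep]
  tauto

theorem pvTokens_eq (s : String) :
    pvTokens s = ((PySem.Str.split₀ (aggressive_fix_punc s)).map
      (fun t => (PySem.Chars.splitOn t.toList "'".toList).map String.ofList)).flatten := by
  unfold pvTokens
  rw [pvTokGo_filter]
  rw [(pvTokGo_main _).1 [] (by intro c hc; exact (List.mem_filter.mp hc).2)]
  have hsp : ∀ (l : List String),
      (l.map (fun t => (PySem.Chars.splitOn t.toList "'".toList).map String.ofList)) =
        ((l.map String.toList).map (fun w => (pvSplitQ w).map String.ofList)) := by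
    intro l
    rw [List.map_map]
    apply List.map_congr_left
    intro t _
    rw [show ("'" : String).toList = ['\''] from rfl, pvSplitOn_eq_pvSplitQ]
    simp [Function.comp_apply]
  rw [hsp, PySem.Str.split₀_map_toList, pv_fixpunc_toList, pvSplit0_eq_pvWords]
  simp [pvF, List.map_flatten, List.map_map, Function.comp_def]

-- the closed segments, as a structural recursion (common spec of both loops)
def pvSegsRec : List String → List String → List String
  | [], _ => []
  | x :: xs, buf =>
    if !(PySem.Str.startswith x " ") then
      PySem.Str.join "" (buf ++ [x]) :: pvSegsRec xs []
    else
      pvSegsRec xs (buf ++ [x])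

theorem pv_flatten_intersperse_nil (l : List (List Char)) :
    (List.intersperse ([] : List Char) l).flatten = l.flatten := by
  induction l with
  | nil => rfl
  | cons a t ih =>
    cases t with
    | nil => rfl
    | cons b t' => simpa [List.intersperse] using ih

theorem pv_join_snoc (buf : List String) (x : String) :
    PySem.Str.join "" buf ++ x = PySem.Str.join "" (buf ++ [x]) := by
  simp [PySem.Str.join, PySem.Chars.join, List.intercalate, pv_flatten_intersperse_nil]

theorem pv_A_fold (l : List String) : ∀ (acc : List (List String)) (buf : List String) (s : String),
    s = PySem.Str.join "" buf →
    (l.foldl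
      (fun (st : List (List String) × String) x =>
        let s := st.2 ++ x
        if !(PySem.Str.startswith x " ") then
          (st.1 ++ [((PySem.Str.split₀ (aggressive_fix_punc s)).map (fun t => (PySem.Chars.splitOn t.toList "'".toList).map String.ofList)).flatten], "")
        else
          (st.1, s))
      (acc, s)).1 = acc ++ (pvSegsRec l buf).map (fun seg => ((PySem.Str.split₀ (aggressive_fix_punc seg)).map (fun t => (PySem.Chars.splitOn t.toList "'".toList).map String.ofList)).flatten) := by
  induction l with
  | nil => intro acc buf s _; simp [pvSegsRec]
  | cons x xs ih =>
    intro acc buf s hs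
    simp only [List.foldl_cons]
    by_cases h : PySem.Str.startswith x " " = true
    · simp only [h, Bool.not_true, Bool.false_eq_true, if_false, pvSegsRec]
      rw [ih acc (buf ++ [x]) (s ++ x) (by rw [hs, pv_join_snoc])]
    · simp only [Bool.not_eq_true] at h
      simp only [h, Bool.not_false, if_true, pvSegsRec]
      rw [ih _ [] "" rfl, hs, pv_join_snoc]
      simp

-- take one more element of a drop
theorem pv_take_snoc (L : List String) (x : String) (xs : List String) (p prev : Nat)
    (hle : prev ≤ p) (hd : L.drop p = x :: xs) :
    (L.drop prev).take (p + 1 - prev) = (L.drop prev).take (p - prev) ++ [x] := by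
  have h1 : p + 1 - prev = (p - prev) + 1 := by omega
  have h0 : (L.drop p)[0]? = some x := by rw [hd]; rfl
  rw [List.getElem?_drop] at h0
  simp only [Nat.add_zero] at h0
  have hx : (L.drop prev)[p - prev]? = some x := by
    rw [List.getElem?_drop, show prev + (p - prev) = p by omega]
    exact h0
  rw [h1, List.take_add_one, hx]
  rfl

theorem pv_drop_succ (L : List String) (x : String) (xs : List String) (p : Nat)
    (hd : L.drop p = x :: xs) : L.drop (p + 1) = xs := by
  rw [← List.tail_drop, hd]
  rfl

-- B's boundary-slicing fold produces the same segments
theorem pv_B_fold (L : List String) : ∀ (xs : List String) (p prev : Nat) (out : List (List String)),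
    prev ≤ p → L.drop p = xs →
    (((PySem.List.enumerate xs (p : Int)).filterMap
        (fun q => if !(PySem.Str.startswith q.2 " ") then some q.1 else none)).foldl
      (fun (st : List (List String) × Int) c =>
        (st.1 ++ [pvTokens (PySem.Str.join "" (PySem.List.slice L (some st.2) (some (c + 1))))], c + 1))
      (out, (prev : Int))).1
    = out ++ (pvSegsRec xs ((L.drop prev).take (p - prev))).map pvTokens := by
  intro xs
  induction xs with
  | nil =>
    intro p prev out _ _
    simp [PySem.List.enumerate, pvSegsRec]
  | cons x xs ih =>
    intro p prev out hle hd
    have hd' : L.drop (p + 1) = xs := pv_drop_succ L x xs p hd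
    rw [PySem.List.enumerate_cons]
    by_cases hsw : PySem.Str.startswith x " " = true
    · rw [List.filterMap_cons]
      simp only [hsw, Bool.not_true, Bool.false_eq_true, if_false]
      have hc : (p : Int) + 1 = ((p + 1 : Nat) : Int) := by push_cast; ring
      rw [hc, ih (p + 1) prev out (by omega) hd']
      rw [pv_take_snoc L x xs p prev hle hd]
      have hsw' : PySem.Chars.startswith x.toList [' '] = true := by simpa using hsw
      simp [pvSegsRec, hsw']
    · rw [List.filterMap_cons]
      simp only [Bool.not_eq_true] at hsw
      simp only [hsw, Bool.not_false, if_true]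
      rw [List.foldl_cons]
      have hc : (p : Int) + 1 = ((p + 1 : Nat) : Int) := by push_cast; ring
      simp only [hc]
      rw [ih (p + 1) (p + 1) _ (le_refl _) hd']
      rw [PySem.List.slice_natCast]
      rw [pv_take_snoc L x xs p prev hle hd]
      have hsw' : PySem.Chars.startswith x.toList [' '] = false := by simpa using hsw
      simp [pvSegsRec, hsw']

-- ===== VERDICT (by name: the statement is the Claim_ definition above) =====
theorem lasttofirst_str_spec : Claim_equal_lasttofirst_str := by
  intro nparr _
  unfold Spec_lasttofirst_str lasttofirst_str lasttofirst_str_alt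
  rw [pv_A_fold nparr [] [] "" rfl]
  have hB := pv_B_fold nparr nparr 0 0 [] (le_refl 0) (by simp)
  simp only [Nat.cast_zero] at hB
  rw [hB]
  simp [pvTokens_eq]
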